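-- pv_equiv track=rewrite | github.com/WoodsBaneAdmin/lorekeeper | app/BreedingRoller/old_python/Gene_Roller.py | dilution
-- ===== SOURCE A (Python) =====
-- dilutions = {"Scorched": ["nSc" , "ScSc"], "Sunglow": ["nSg" , "SgSg"], "Dimmed": ["nDi" , "DiDi"]}
--
-- def dilution (gene):
--     key_list = list(dilutions.keys())
--     val_list = list(dilutions.values())
--
--     position = 0
--     for i in val_list:
--         if gene in i:
--             index = i.index(gene)
--             break
--         else:
--             position += 1
--     if position >= (len(key_list)):
--         return "Invalid gene"
--     else:
--         value = key_list[position]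
--         return value
-- ===== SOURCE B (Python) =====
-- dilutions = {"Scorched": ["nSc" , "ScSc"], "Sunglow": ["nSg" , "SgSg"], "Dimmed": ["nDi" , "DiDi"]}
--
-- _reverse = {allele: category for category, alleles in dilutions.items() for allele in alleles}
--
-- def dilution(gene):
--     return _reverse.get(gene, "Invalid gene")
-- ===== Notes on version B (the rewrite author's own statement) =====
-- stated objective: idiomatic
-- what changed: Replaces the per-call linear scan over the dict's value lists (with a manual position counter and key_list indexing) by a module-level reverse-lookup dict from allele to category and a single dict.get.
import Mathlib
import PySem

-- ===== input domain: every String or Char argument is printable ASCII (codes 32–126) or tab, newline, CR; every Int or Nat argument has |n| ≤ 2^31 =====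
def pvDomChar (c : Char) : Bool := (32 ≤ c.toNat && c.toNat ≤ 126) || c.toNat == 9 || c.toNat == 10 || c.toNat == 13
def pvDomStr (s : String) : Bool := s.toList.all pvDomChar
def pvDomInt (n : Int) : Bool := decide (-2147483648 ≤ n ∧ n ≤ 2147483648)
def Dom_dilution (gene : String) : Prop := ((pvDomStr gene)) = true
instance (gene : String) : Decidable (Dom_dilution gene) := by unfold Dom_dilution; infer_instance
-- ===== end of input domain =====

-- B replaces A's per-call linear scan over the value lists by a precomputed
-- allele→category reverse-lookup dict and a single lookup (idiomatic rewrite).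

-- ===== PORT A =====
-- dilutions = {"Scorched": [...], "Sunglow": [...], "Dimmed": [...]}
def pvDilutions : PySem.Dict String (List String) :=
  PySem.Dict.mk
    [("Scorched", ["nSc", "ScSc"]), ("Sunglow", ["nSg", "SgSg"]), ("Dimmed", ["nDi", "DiDi"])]

-- the 'for i in val_list' loop: returns the final value of 'position'
-- ('index = i.index(gene)' is computed in A but never used; the break just stops the loop)
def pvLoopA (gene : String) : List (List String) → Int → Int
  | [], position => position
  | i :: rest, position =>
    if gene ∈ i then position else pvLoopA gene rest (position + 1)

def dilution (gene : String) : String :=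
  let key_list := pvDilutions.keys
  let val_list := pvDilutions.values
  let position := pvLoopA gene val_list 0
  if position ≥ (key_list.length : Int) then "Invalid gene"
  else (PySem.List.pyGet? key_list position).getD ""  -- key_list[position]; in range here, so no IndexError

-- ===== PORT B =====
-- _reverse = {allele: category for category, alleles in dilutions.items() for allele in alleles}
def pvReverse : PySem.Dict String String :=
  pvDilutions.items.foldl
    (fun d p => p.2.foldl (fun d a => d.insert a p.1) d) PySem.Dict.empty

def dilution_alt (gene : String) : String :=
  pvReverse.getD gene "Invalid gene"

-- ===== PRECONDITION & SPEC =====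
def Spec_dilution (gene : String) (out : String) : Prop := out = dilution_alt gene
instance (gene : String) (out : String) : Decidable (Spec_dilution gene out) := by unfold Spec_dilution; infer_instance

-- ===== CLAIM (what is proved, stated in full; the proofs are below) =====
def Claim_equal_dilution : Prop := ∀ (gene : String), Dom_dilution gene → Spec_dilution gene (dilution gene)

-- ===== LEMMAS AND PROOFS =====

-- ===== VERDICT (by name: the statement is the Claim_ definition above) =====
theorem dilution_spec : Claim_equal_dilution := by
  intro gene _
  unfold Spec_dilution
  by_cases h1 : gene = "nSc"
  · subst h1; decide
  by_cases h2 : gene = "ScSc"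
  · subst h2; decide
  by_cases h3 : gene = "nSg"
  · subst h3; decide
  by_cases h4 : gene = "SgSg"
  · subst h4; decide
  by_cases h5 : gene = "nDi"
  · subst h5; decide
  by_cases h6 : gene = "DiDi"
  · subst h6; decide
  simp [dilution, dilution_alt, pvReverse, pvDilutions, pvLoopA,
        PySem.Dict.getD_insert, PySem.Dict.keys_mk, PySem.Dict.values_mk,
        PySem.Dict.getD_empty, h1, h2, h3, h4, h5, h6]
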